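-- pv_equiv track=rewrite | github.com/notcapi/collatz-explorer | collatz.py | generate_collatz_data
-- ===== SOURCE A (Python) =====
-- def collatz_sequence(n):
--     sequence = [n]
--     while n != 1:
--         if n % 2 == 0:
--             n //= 2
--         else:
--             n = 3 * n + 1
--         sequence.append(n)
--     return sequence
--
-- def generate_collatz_data(limit):
--     data = []
--     for i in range(1, limit + 1):
--         sequence = collatz_sequence(i)
--         data.append({
--             'start': i,
--             'steps': len(sequence) - 1,
--             'max_value': max(sequence)
--         })
--     return data
-- ===== SOURCE B (Python) =====
-- def _steps_max(i):
--     # one streaming pass; an odd step is fused with the halving that must follow it,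
--     # and the running max is only checked after odd steps (halving never raises it)
--     steps, mx, n = 0, i, i
--     while n != 1:
--         if n % 2 == 0:
--             n //= 2
--             steps += 1
--         else:
--             n = 3 * n + 1
--             steps += 2
--             if mx < n:
--                 mx = n
--             n //= 2
--     return steps, mx
--
--
-- def generate_collatz_data(limit):
--     return [
--         {'start': i, 'steps': s, 'max_value': m}
--         for i in range(1, limit + 1)
--         for s, m in (_steps_max(i),)
--     ]
-- ===== Notes on version B (the rewrite author's own statement) =====
-- stated objective: alternative
-- what changed: B never materialises the Collatz sequence or re-scans it with len/max: per start it streams one loop keeping a (steps, running-max) pair, fusing each odd step with the forced halving that follows it (so roughly half the iterations) and checking the max only after odd steps.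
import Mathlib
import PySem

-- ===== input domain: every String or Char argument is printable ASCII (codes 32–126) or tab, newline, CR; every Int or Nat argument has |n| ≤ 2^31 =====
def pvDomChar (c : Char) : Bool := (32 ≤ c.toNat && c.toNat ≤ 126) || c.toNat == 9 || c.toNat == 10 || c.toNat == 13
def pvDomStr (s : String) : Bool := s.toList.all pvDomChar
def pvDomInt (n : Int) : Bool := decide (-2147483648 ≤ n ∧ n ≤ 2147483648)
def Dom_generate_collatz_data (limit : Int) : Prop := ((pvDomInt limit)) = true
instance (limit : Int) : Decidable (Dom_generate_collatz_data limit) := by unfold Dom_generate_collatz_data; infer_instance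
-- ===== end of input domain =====

-- B fuses each odd Collatz step with the forced halving that follows it and keeps a running
-- (steps, max) pair instead of materialising the sequence list and re-scanning it with len/max.

-- ===== PORT A =====
-- while n != 1: ... ported with a fuel counter (one unit per Python loop iteration;
-- on exhaustion the partial sequence is returned — Python has no fuel, this branch is a port artifact)
def collatzSeqGo : Nat → Int → List Int → List Int
  | 0, _, acc => acc.reverse
  | fuel+1, n, acc =>
    if n ≠ 1 then
      let n' := if PySem.Int.mod n 2 = 0 then PySem.Int.floordiv n 2 else 3*n+1
      collatzSeqGo fuel n' (n' :: acc)
    else acc.reverse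

def collatz_sequence (n : Int) : List Int := collatzSeqGo 1000000000 n [n]

def generate_collatz_data (limit : Int) : List (List (String × Int)) :=
  (PySem.List.pyRange 1 (limit+1) 1).foldl (fun data i =>
    let sequence := collatz_sequence i
    data ++ [[("start", i),
              ("steps", (sequence.length : Int) - 1),
              ("max_value", (PySem.List.max? sequence (fun y => y)).getD 0)]]) []

-- ===== PORT B =====
-- Source B's while loop with the same fuel budget as A's port (one unit per original Python
-- iteration, so the fused odd branch consumes 2; exhaustion mid-branch returns the state
-- after the 3n+1 update — unreachable in Python, which has no fuel)
def altGo : Nat → Int → Int → Int → Int × Int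
  | 0, _, steps, mx => (steps, mx)
  | fuel+1, n, steps, mx =>
    if n ≠ 1 then
      if PySem.Int.mod n 2 = 0 then
        altGo fuel (PySem.Int.floordiv n 2) (steps+1) mx
      else
        let m := 3*n+1
        let mx' := if mx < m then m else mx
        match fuel with
        | 0 => (steps+1, mx')
        | f+1 => altGo f (PySem.Int.floordiv m 2) (steps+2) mx'
    else (steps, mx)

def steps_max (i : Int) : Int × Int := altGo 1000000000 i 0 i

def generate_collatz_data_alt (limit : Int) : List (List (String × Int)) :=
  (PySem.List.pyRange 1 (limit+1) 1).map (fun i =>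
    let p := steps_max i
    [("start", i), ("steps", p.1), ("max_value", p.2)])

-- ===== PRECONDITION & SPEC =====
def Spec_generate_collatz_data (limit : Int) (out : List (List (String × Int))) : Prop := out = generate_collatz_data_alt limit
instance (limit : Int) (out : List (List (String × Int))) : Decidable (Spec_generate_collatz_data limit out) := by unfold Spec_generate_collatz_data; infer_instance

-- ===== CLAIM (what is proved, stated in full; the proofs are below) =====
def Claim_equal_generate_collatz_data : Prop := ∀ (limit : Int), Dom_generate_collatz_data limit → Spec_generate_collatz_data limit (generate_collatz_data limit)

-- ===== LEMMAS AND PROOFS =====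

-- max(xs) returns THE maximum value whenever some m in the list bounds the list
lemma max?_eq_of_bounds (l : List Int) (m : Int) (hne : l ≠ []) (hmem : m ∈ l)
    (hub : ∀ y ∈ l, y ≤ m) : PySem.List.max? l (fun y => y) = some m := by
  obtain ⟨x, t, rfl⟩ := List.exists_cons_of_ne_nil hne
  rw [PySem.List.max?_id_cons]
  have h1 := PySem.List.le_foldl_max t x
  have h2 := PySem.List.foldl_max_mem t x
  have hle : t.foldl max x ≤ m := by
    rcases h2 with h | h
    · rw [h]; exact hub x (List.mem_cons_self)
    · exact hub _ (List.mem_cons_of_mem _ h)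
  have hge : m ≤ t.foldl max x := by
    rcases List.mem_cons.mp hmem with rfl | h
    · exact h1.1
    · exact h1.2 m h
  exact congrArg some (le_antisymm hle hge)

-- loop correspondence: A's sequence loop vs B's fused streaming loop, same fuel
lemma go_corr : ∀ (fuel : Nat) (n : Int) (t : List Int) (steps m : Int),
    0 < n → m ∈ n :: t → (∀ y ∈ n :: t, y ≤ m) →
    steps = ((n :: t).length : Int) - 1 →
    ((collatzSeqGo fuel n (n :: t)).length : Int) - 1 = (altGo fuel n steps m).1
    ∧ PySem.List.max? (collatzSeqGo fuel n (n :: t)) (fun y => y) = some ((altGo fuel n steps m).2) := by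
  intro fuel
  induction fuel using Nat.strong_induction_on with
  | _ fuel ih =>
    intro n t steps m hn hmem hub hsteps
    match fuel with
    | 0 =>
      refine ⟨by simp [collatzSeqGo, altGo, hsteps], ?_⟩
      simp only [collatzSeqGo, altGo]
      exact max?_eq_of_bounds _ m (by simp) (by simp only [List.mem_reverse]; exact hmem)
        (fun y hy => hub y (List.mem_reverse.mp hy))
    | fuel + 1 =>
      by_cases h1 : n = 1
      · subst h1
        refine ⟨by simp [collatzSeqGo, altGo, hsteps], ?_⟩
        simp only [collatzSeqGo, altGo, if_neg (show ¬(1:Int) ≠ 1 by simp)]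
        exact max?_eq_of_bounds _ m (by simp) (by simp only [List.mem_reverse]; exact hmem)
          (fun y hy => hub y (List.mem_reverse.mp hy))
      · have hmod : PySem.Int.mod n 2 = n % 2 := PySem.Int.mod_eq_emod_of_pos (by norm_num)
        have hdiv : PySem.Int.floordiv n 2 = n / 2 := PySem.Int.floordiv_eq_ediv_of_pos (by norm_num)
        by_cases he : n % 2 = 0
        · -- even step: halve; the new value is ≤ n ≤ m, so B does not touch mx
          have hn2 : 0 < n / 2 := by omega
          have hle : n / 2 ≤ m := le_trans (by omega) (hub n (List.mem_cons_self))
          simp only [collatzSeqGo, altGo, if_pos h1, hmod, hdiv, if_pos he]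
          exact ih fuel (by omega) (n/2) (n :: t) (steps+1) m hn2
            (List.mem_cons_of_mem _ hmem)
            (by intro y hy; rcases List.mem_cons.mp hy with rfl | hy
                · exact hle
                · exact hub y hy)
            (by simp at hsteps ⊢; omega)
        · -- odd step: n' = 3n+1 (even, ≠ 1); A takes two loop iterations, B one fused step
          have hne' : (3*n+1) ≠ 1 := by omega
          have he' : (3*n+1) % 2 = 0 := by omega
          have hmod' : PySem.Int.mod (3*n+1) 2 = (3*n+1) % 2 := PySem.Int.mod_eq_emod_of_pos (by norm_num)
          have hdiv' : PySem.Int.floordiv (3*n+1) 2 = (3*n+1) / 2 := PySem.Int.floordiv_eq_ediv_of_pos (by norm_num)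
          have hub' : ∀ y ∈ (3*n+1) :: n :: t, y ≤ (if m < 3*n+1 then 3*n+1 else m) := by
            intro y hy
            rcases List.mem_cons.mp hy with rfl | hy
            · split <;> omega
            · have := hub y hy; split <;> omega
          have hmem' : (if m < 3*n+1 then 3*n+1 else m) ∈ (3*n+1) :: n :: t := by
            split
            · exact List.mem_cons_self
            · exact List.mem_cons_of_mem _ hmem
          simp only [collatzSeqGo, altGo, if_pos h1, hmod, hdiv, if_neg he]
          match fuel with
          | 0 =>
            simp only [collatzSeqGo]
            refine ⟨by simp at hsteps ⊢; omega, ?_⟩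
            exact max?_eq_of_bounds _ _ (by simp) (by simp only [List.mem_reverse]; exact hmem')
              (fun y hy => hub' y (List.mem_reverse.mp hy))
          | f + 1 =>
            have hn2 : 0 < (3*n+1) / 2 := by omega
            simp only [collatzSeqGo, if_pos hne', hmod', hdiv', if_pos he']
            exact ih f (by omega) ((3*n+1)/2) ((3*n+1) :: n :: t) (steps+2)
              (if m < 3*n+1 then 3*n+1 else m) hn2
              (List.mem_cons_of_mem _ hmem')
              (by intro y hy
                  rcases List.mem_cons.mp hy with rfl | hy
                  · refine le_trans (by omega) (hub' (3*n+1) List.mem_cons_self)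
                  · exact hub' y hy)
              (by simp at hsteps ⊢; omega)

lemma row_eq (i : Int) (hi : 0 < i) :
    [("start", i),
     ("steps", ((collatz_sequence i).length : Int) - 1),
     ("max_value", (PySem.List.max? (collatz_sequence i) (fun y => y)).getD 0)]
    = [("start", i), ("steps", (steps_max i).1), ("max_value", (steps_max i).2)] := by
  have h := go_corr 1000000000 i [] 0 i hi (by simp) (by simp) (by simp)
  simp only [collatz_sequence, steps_max] at *
  rw [h.1, h.2]
  simp

-- ===== VERDICT (by name: the statement is the Claim_ definition above) =====
theorem generate_collatz_data_spec : Claim_equal_generate_collatz_data := by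
  intro limit _
  unfold Spec_generate_collatz_data generate_collatz_data generate_collatz_data_alt
  rw [PySem.List.foldl_append_singleton_eq_map]
  apply List.map_congr_left
  intro i hi
  have hi1 : 1 ≤ i := (PySem.List.mem_pyRange_one.mp hi).1
  simpa using row_eq i (by omega)
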